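-- pv_equiv track=rewrite | github.com/sunkthought/minions-openwebui | generator_script.py | extract_content_after_imports
-- ===== SOURCE A (Python) =====
-- def extract_content_after_imports(content: str) -> str:
--     """Extract content after import statements, preserving the actual code."""
--     lines = content.split('\n')
--     content_lines = []
--     in_imports = True
--
--     for line in lines:
--         stripped = line.strip()
--
--         # Skip empty lines and comments at the start
--         if in_imports and (not stripped or stripped.startswith('#')):
--             continue
--
--         # Skip import statements
--         if in_imports and (stripped.startswith('import ') or stripped.startswith('from ')):
--             continue
--
--         # Once we hit non-import content, include everything
--         in_imports = False
--         content_lines.append(line)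
--
--     return '\n'.join(content_lines)
-- ===== SOURCE B (Python) =====
-- def extract_content_after_imports(content: str) -> str:
--     """Walk the raw string suffix by suffix (no line list, no accumulator, no join):
--     peek at the first line of the remaining suffix; the answer is the first suffix
--     whose leading line is real content, else ''."""
--     rest = content
--     while True:
--         nl = rest.find('\n')
--         line = rest if nl == -1 else rest[:nl]
--         s = line.strip()
--         if s and not s.startswith(('#', 'import ', 'from ')):
--             return rest
--         if nl == -1:
--             return ''
--         rest = rest[nl + 1:]
-- ===== Notes on version B (the rewrite author's own statement) =====
-- stated objective: alternative
-- what changed: B never builds a list of lines: it walks the raw string suffix by suffix with str.find of the newline separator, inspecting only the leading line of each suffix, and returns the surviving suffix of the original string directly instead of A's split/flag-accumulate/join pipeline.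
import Mathlib
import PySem

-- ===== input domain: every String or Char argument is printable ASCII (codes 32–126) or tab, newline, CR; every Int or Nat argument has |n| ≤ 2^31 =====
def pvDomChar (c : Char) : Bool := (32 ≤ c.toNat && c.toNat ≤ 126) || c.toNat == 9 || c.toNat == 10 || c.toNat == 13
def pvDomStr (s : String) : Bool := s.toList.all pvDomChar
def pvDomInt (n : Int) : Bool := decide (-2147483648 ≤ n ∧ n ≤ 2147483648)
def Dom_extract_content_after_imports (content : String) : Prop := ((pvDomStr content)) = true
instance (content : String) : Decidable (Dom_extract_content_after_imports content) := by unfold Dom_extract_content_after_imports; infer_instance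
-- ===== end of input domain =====

-- B walks the raw string suffix by suffix with find('\n') and returns a suffix of the input directly, instead of A's split/flag-accumulate/join pipeline; same value, alternative algorithm.


-- ===== PORT A =====
-- one loop step of A: state = (in_imports, content_lines)
def pvAStep (st : Bool × List (List Char)) (line : List Char) : Bool × List (List Char) :=
  let stripped := PySem.Chars.strip line
  if st.1 && (stripped.isEmpty || PySem.Chars.startswith stripped ['#']) then st
  else if st.1 && (PySem.Chars.startswith stripped "import ".toList || PySem.Chars.startswith stripped "from ".toList) then st
  else (false, st.2 ++ [line])

def extract_content_after_imports (content : String) : String :=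
  let lines := PySem.Chars.splitOn content.toList ['\n']
  String.ofList (PySem.Chars.join ['\n'] ((lines.foldl pvAStep (true, [])).2))

-- ===== PORT B =====
-- Source B's while loop: examine the first line of the remaining suffix `rest`
def pvBGo (rest : List Char) : List Char :=
  let nl := PySem.Chars.find rest ['\n']
  let line := if nl = -1 then rest else PySem.Chars.slice rest none (some nl)
  let s := PySem.Chars.strip line
  if !s.isEmpty && !(PySem.Chars.startswith s ['#'] || PySem.Chars.startswith s "import ".toList || PySem.Chars.startswith s "from ".toList) then
    rest
  else if hnl : nl = -1 then []
  else pvBGo (PySem.Chars.slice rest (some (nl + 1)) none)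
termination_by rest.length
decreasing_by
  · have h0 : 0 ≤ PySem.Chars.find rest ['\n'] := by
      have := PySem.Chars.neg_one_le_find rest ['\n']
      omega
    obtain ⟨tl, htl⟩ := (PySem.Chars.find_spec (s := rest) (sub := ['\n']) h0).1
    have h1 : (List.drop (PySem.Chars.find rest ['\n']).toNat rest).length = tl.length + 1 := by
      rw [← htl]; simp
    have h2 : (List.drop (PySem.Chars.find rest ['\n']).toNat rest).length
        = rest.length - (PySem.Chars.find rest ['\n']).toNat := List.length_drop
    have hlt : (PySem.Chars.find rest ['\n']).toNat < rest.length := by omega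
    have hs : PySem.Chars.slice rest (some (PySem.Chars.find rest ['\n'] + 1)) none
        = rest.drop (PySem.Chars.find rest ['\n'] + 1).toNat :=
      PySem.List.slice_from _ (by omega)
    rw [hs]
    simp only [List.length_drop]
    omega

def extract_content_after_imports_alt (content : String) : String :=
  String.ofList (pvBGo content.toList)

-- ===== PRECONDITION & SPEC =====
def Spec_extract_content_after_imports (content : String) (out : String) : Prop := out = extract_content_after_imports_alt content
instance (content : String) (out : String) : Decidable (Spec_extract_content_after_imports content out) := by unfold Spec_extract_content_after_imports; infer_instance

-- ===== CLAIM (what is proved, stated in full; the proofs are below) =====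
def Claim_equal_extract_content_after_imports : Prop := ∀ (content : String), Dom_extract_content_after_imports content → Spec_extract_content_after_imports content (extract_content_after_imports content)

-- ===== LEMMAS AND PROOFS =====
-- proof-only helpers: the list of lines of a string, and the shared preamble test
def pvIsPreamble (line : List Char) : Bool :=
  let s := PySem.Chars.strip line
  s.isEmpty || PySem.Chars.startswith s ['#'] ||
    PySem.Chars.startswith s "import ".toList || PySem.Chars.startswith s "from ".toList

def pvSkipPreamble : List (List Char) → List (List Char)
  | [] => []
  | l :: ls => if pvIsPreamble l then pvSkipPreamble ls else l :: ls

def pvPre (p : List Char) : List (List Char) → List (List Char)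
  | [] => [p]
  | x :: xs => (p ++ x) :: xs

def pvLines : List Char → List (List Char)
  | [] => [[]]
  | c :: t => if c = '\n' then [] :: pvLines t else pvPre [c] (pvLines t)

theorem pvLines_ne_nil (cs : List Char) : pvLines cs ≠ [] := by
  cases cs with
  | nil => simp [pvLines]
  | cons c t =>
      simp only [pvLines]
      split
      · simp
      · cases h : pvLines t <;> simp [pvPre]

theorem pvPre_nil (X : List (List Char)) (h : X ≠ []) : pvPre [] X = X := by
  cases X with
  | nil => exact absurd rfl h
  | cons x xs => simp [pvPre]

theorem pvPre_pvPre (a b : List Char) (X : List (List Char)) :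
    pvPre a (pvPre b X) = pvPre (a ++ b) X := by
  cases X <;> simp [pvPre]

-- A's helper splitOn equals pvLines (single-character separator '\n')
theorem pvCond_eq (line : List Char) :
    (!(PySem.Chars.strip line).isEmpty && !(PySem.Chars.startswith (PySem.Chars.strip line) ['#'] || PySem.Chars.startswith (PySem.Chars.strip line) "import ".toList || PySem.Chars.startswith (PySem.Chars.strip line) "from ".toList)) = !pvIsPreamble line := by
  simp only [pvIsPreamble]
  cases (PySem.Chars.strip line).isEmpty <;>
    cases PySem.Chars.startswith (PySem.Chars.strip line) ['#'] <;>
    cases PySem.Chars.startswith (PySem.Chars.strip line) "import ".toList <;>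
    cases PySem.Chars.startswith (PySem.Chars.strip line) "from ".toList <;> rfl

theorem pvSplitOn_go_eq (fuel : Nat) (l cur : List Char) (acc : List (List Char))
    (h : l.length < fuel) :
    PySem.Chars.splitOn.go ['\n'] fuel l cur acc = acc.reverse ++ pvPre cur.reverse (pvLines l) := by
  induction fuel generalizing l cur acc with
  | zero => omega
  | succ fuel ih =>
      cases l with
      | nil => simp [PySem.Chars.splitOn.go, pvLines, pvPre]
      | cons c rest =>
          by_cases hc : c = '\n'
          · subst hc
            have : List.isPrefixOf ['\n'] ('\n' :: rest) = true := by simp [List.isPrefixOf]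
            rw [PySem.Chars.splitOn.go]
            simp only [this, if_pos]
            rw [ih _ _ _ (by simpa using Nat.lt_of_succ_lt_succ h)]
            simp only [List.reverse_nil, List.length_cons, List.length_nil, List.drop_succ_cons, List.drop_zero, Nat.zero_add]
            rw [pvPre_nil _ (pvLines_ne_nil rest)]
            simp [pvLines, pvPre]
          · have : List.isPrefixOf ['\n'] (c :: rest) = true ↔ False := by
              simp [List.isPrefixOf]; exact fun hh => hc hh.symm
            rw [PySem.Chars.splitOn.go]
            simp only [eq_false (fun hh => this.mp hh), if_neg, not_false_iff]
            rw [ih _ _ _ (by simpa using Nat.lt_of_succ_lt_succ h)]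
            simp [pvLines, hc, pvPre_pvPre]

theorem pvSplitOn_eq_pvLines (cs : List Char) :
    PySem.Chars.splitOn cs ['\n'] = pvLines cs := by
  rw [PySem.Chars.splitOn, pvSplitOn_go_eq _ _ _ _ (by omega)]
  simp [pvPre_nil _ (pvLines_ne_nil cs)]

-- join is the inverse of pvLines
theorem pvJoin_pvPre (c : Char) (X : List (List Char)) (h : X ≠ []) :
    PySem.Chars.join ['\n'] (pvPre [c] X) = c :: PySem.Chars.join ['\n'] X := by
  cases X with
  | nil => exact absurd rfl h
  | cons x xs =>
      cases xs with
      | nil => simp [pvPre, PySem.Chars.join, List.intercalate]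
      | cons y ys => simp [pvPre, PySem.Chars.join, List.intercalate]

theorem pvJoin_pvLines (cs : List Char) :
    PySem.Chars.join ['\n'] (pvLines cs) = cs := by
  induction cs with
  | nil => simp [pvLines, PySem.Chars.join, List.intercalate]
  | cons c t ih =>
      by_cases hc : c = '\n'
      · subst hc
        simp only [pvLines, reduceIte]
        cases ht : pvLines t with
        | nil => exact absurd ht (pvLines_ne_nil t)
        | cons y ys =>
            rw [← ht]
            simp [PySem.Chars.join, List.intercalate, ht] at ih ⊢
            simpa [ht] using ih
      · simp only [pvLines, if_neg hc]
        rw [pvJoin_pvPre _ _ (pvLines_ne_nil t), ih]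

theorem pvLines_no_nl (cs : List Char) (h : '\n' ∉ cs) : pvLines cs = [cs] := by
  induction cs with
  | nil => rfl
  | cons c t ih =>
      have hc : c ≠ '\n' := fun hh => h (hh ▸ List.mem_cons_self)
      have ht : '\n' ∉ t := fun hh => h (List.mem_cons_of_mem _ hh)
      simp [pvLines, hc, ih ht, pvPre]

theorem pvLines_append (t r : List Char) (h : '\n' ∉ t) :
    pvLines (t ++ '\n' :: r) = t :: pvLines r := by
  induction t with
  | nil => simp [pvLines]
  | cons c t ih =>
      have hc : c ≠ '\n' := fun hh => h (hh ▸ List.mem_cons_self)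
      have ht : '\n' ∉ t := fun hh => h (List.mem_cons_of_mem _ hh)
      simp [pvLines, hc, ih ht, pvPre]

-- B's loop computes join ∘ skip-preamble ∘ lines
theorem pvBGo_eq (cs : List Char) :
    pvBGo cs = PySem.Chars.join ['\n'] (pvSkipPreamble (pvLines cs)) := by
  generalize hn : cs.length = n
  induction n using Nat.strong_induction_on generalizing cs with
  | _ n ih =>
  rw [pvBGo]
  by_cases hf : PySem.Chars.find cs ['\n'] = -1
  · have hnot : ¬ (['\n'] <:+: cs) := (PySem.Chars.find_eq_neg_one_iff _ _).mp hf
    have hmem : '\n' ∉ cs := by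
      intro hm
      obtain ⟨s, t, hst⟩ := List.append_of_mem hm
      exact hnot ⟨s, t, by rw [hst]; simp⟩
    rw [pvLines_no_nl cs hmem]
    simp only [hf, reduceIte, pvSkipPreamble, pvCond_eq]
    by_cases hp : pvIsPreamble cs = true
    · simp [hp, PySem.Chars.join, List.intercalate]
    · simp [hp, PySem.Chars.join, List.intercalate]
  · have h0 : 0 ≤ PySem.Chars.find cs ['\n'] := by
      have := PySem.Chars.neg_one_le_find cs ['\n']
      omega
    set k := (PySem.Chars.find cs ['\n']).toNat with hk
    obtain ⟨hpref, hmin⟩ := PySem.Chars.find_spec (s := cs) (sub := ['\n']) h0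
    obtain ⟨tl, htl⟩ := hpref
    have h1 : cs.drop k = '\n' :: tl := by rw [← htl]; rfl
    have h2 : cs.drop (k + 1) = tl := by
      rw [← List.tail_drop, h1]; rfl
    have hdrop : cs.drop k = '\n' :: cs.drop (k + 1) := by rw [h1, h2]
    have hklt : k < cs.length := by
      have hl1 : (cs.drop k).length = tl.length + 1 := by rw [h1]; simp
      have hl2 : (cs.drop k).length = cs.length - k := List.length_drop
      omega
    have htake : '\n' ∉ cs.take k := by
      intro hm
      obtain ⟨i, hi, hgi⟩ := List.getElem_of_mem hm
      have hik : i < k := by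
        simp only [List.length_take, lt_inf_iff] at hi
        exact hi.1
      apply hmin i hik
      refine ⟨(cs.drop i).tail, ?_⟩
      have : cs.drop i = cs[i] :: (cs.drop i).tail := by
        rw [List.drop_eq_getElem_cons (by omega)]
        simp
      rw [List.getElem_take] at hgi
      rw [this, hgi]
      simp
    have hsplitcs : cs = cs.take k ++ '\n' :: cs.drop (k + 1) := by
      conv_lhs => rw [← List.take_append_drop k cs]
      rw [hdrop]
    have hlines : pvLines cs = cs.take k :: pvLines (cs.drop (k + 1)) := by
      conv_lhs => rw [hsplitcs]
      exact pvLines_append _ _ htake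
    have hslice1 : PySem.Chars.slice cs none (some (PySem.Chars.find cs ['\n'])) = cs.take k :=
      PySem.List.slice_to _ h0
    have hslice2 : PySem.Chars.slice cs (some (PySem.Chars.find cs ['\n'] + 1)) none = cs.drop (k + 1) :=
      (PySem.List.slice_from _ (by omega)).trans (by congr 1; omega)
    simp only [hf, reduceIte, hslice1, hslice2, hlines, pvCond_eq]
    by_cases hp : pvIsPreamble (cs.take k) = true
    · simp only [hp, Bool.not_true, Bool.false_eq_true, if_neg, reduceIte, pvSkipPreamble, not_false_iff]
      exact ih (cs.drop (k + 1)).length (by simp; omega) _ rfl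
    · simp only [Bool.not_eq_true] at hp
      simp only [hp, Bool.not_false, pvSkipPreamble, if_pos, Bool.false_eq_true, reduceIte]
      have hjoin : PySem.Chars.join ['\n'] (cs.take k :: pvLines (cs.drop (k + 1))) =
          cs.take k ++ '\n' :: PySem.Chars.join ['\n'] (pvLines (cs.drop (k + 1))) := by
        cases hr : pvLines (cs.drop (k + 1)) with
        | nil => exact absurd hr (pvLines_ne_nil _)
        | cons y ys => simp [PySem.Chars.join, List.intercalate]
      rw [hjoin, pvJoin_pvLines]
      exact hsplitcs

-- A's fold: once in_imports is false, every remaining line is appended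
theorem pvFoldl_false (ls : List (List Char)) (acc : List (List Char)) :
    (ls.foldl pvAStep (false, acc)).2 = acc ++ ls := by
  induction ls generalizing acc with
  | nil => simp
  | cons l ls ih =>
      simp only [List.foldl_cons, pvAStep]
      simpa using ih (acc ++ [l])

-- with in_imports still true and nothing collected, A's fold computes skip-preamble
theorem pvFoldl_true (ls : List (List Char)) :
    (ls.foldl pvAStep (true, [])).2 = pvSkipPreamble ls := by
  induction ls with
  | nil => rfl
  | cons l ls ih =>
      by_cases h : pvIsPreamble l = true
      · have hstep : pvAStep (true, []) l = (true, []) := by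
          simp only [pvAStep, Bool.true_and]
          split
          · rfl
          · split
            · rfl
            · rename_i hc1 hc2
              simp only [pvIsPreamble, Bool.or_eq_true] at h
              simp only [Bool.or_eq_true, not_or] at hc1 hc2
              tauto
        rw [List.foldl_cons, hstep, ih]
        simp [pvSkipPreamble, h]
      · have hstep : pvAStep (true, []) l = (false, [l]) := by
          simp only [pvAStep, Bool.true_and]
          split
          · rename_i hc1
            exact absurd (by simp only [pvIsPreamble, Bool.or_eq_true]; simp only [Bool.or_eq_true] at hc1; tauto) h
          · split
            · rename_i hc2
              exact absurd (by simp only [pvIsPreamble, Bool.or_eq_true]; simp only [Bool.or_eq_true] at hc2; tauto) h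
            · simp
        rw [List.foldl_cons, hstep, pvFoldl_false]
        simp [pvSkipPreamble, h]

-- ===== VERDICT (by name: the statement is the Claim_ definition above) =====
theorem extract_content_after_imports_spec : Claim_equal_extract_content_after_imports := by
  intro content _
  unfold Spec_extract_content_after_imports extract_content_after_imports extract_content_after_imports_alt
  simp only [pvFoldl_true, pvSplitOn_eq_pvLines, pvBGo_eq]
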